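-- pv_equiv track=rewrite | github.com/Snd18/GENBOT_public | GENBOT/code/utils/utils.py | clearData
-- ===== SOURCE A (Python) =====
-- def clearData(string, charToPut):
--     '''
--     Clear data from invalid character.
--     Invalid characters will be changed by specified character.
--     '''
--     allowedChar = ['a','b','c','d','e','f','g','h','i','j','k','l','m','n','o','p','q','r','s','t','u','v','w','x','y','z','A','B','C','D','E','F','G','H','I','J','K','L','M','N','O','P','Q','R','S','T','U','V','W','X','Y','Z','-','_','1','2','3','4','5','6','7','8','9','0']
--     string = list(string)
--     for i in range(0, len(string)):
--         if not string[i] in allowedChar: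
--             string[i] = charToPut
--     string = ''.join(string)
--     return string
-- ===== SOURCE B (Python) =====
-- import re
--
-- _DISALLOWED = re.compile(r'[^A-Za-z0-9_-]')
--
-- def clearData(string, charToPut):
--     '''
--     Clear data from invalid character.
--     Invalid characters will be changed by specified character.
--     '''
--     return _DISALLOWED.sub(lambda m: charToPut, string)
-- ===== Notes on version B (the rewrite author's own statement) =====
-- stated objective: idiomatic
-- what changed: Replaced A's list(string) round-trip with an index loop and in-place cell assignment by a single precompiled-regex substitution pass (re.sub with a replacement function over the class [^A-Za-z0-9_-]).
import Mathlib
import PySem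

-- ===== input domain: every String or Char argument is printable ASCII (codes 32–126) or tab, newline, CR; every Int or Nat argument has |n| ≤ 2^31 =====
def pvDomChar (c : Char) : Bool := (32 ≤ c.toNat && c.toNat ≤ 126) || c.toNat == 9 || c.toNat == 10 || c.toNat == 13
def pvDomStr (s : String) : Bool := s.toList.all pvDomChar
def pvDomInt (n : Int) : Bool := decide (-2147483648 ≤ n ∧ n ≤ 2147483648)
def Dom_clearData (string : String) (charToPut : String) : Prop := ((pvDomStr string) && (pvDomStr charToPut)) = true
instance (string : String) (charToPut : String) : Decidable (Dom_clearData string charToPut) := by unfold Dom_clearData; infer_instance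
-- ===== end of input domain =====

-- B replaces A's index loop and list round-trip by a single regex-style pass (simpler/idiomatic); same return value.

-- ===== PORT A =====
-- A's allowedChar list of 1-character strings, in source order (strings kept as List Char).
def aAllowedChars : List Char :=
  ['a','b','c','d','e','f','g','h','i','j','k','l','m','n','o','p','q','r','s','t','u','v','w','x','y','z',
   'A','B','C','D','E','F','G','H','I','J','K','L','M','N','O','P','Q','R','S','T','U','V','W','X','Y','Z',
   '-','_','1','2','3','4','5','6','7','8','9','0']
def aAllowed : List (List Char) := aAllowedChars.map (fun c => [c])

def clearData (string : String) (charToPut : String) : String :=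
  -- string = list(string): a mutable list whose cells hold strings (1-char strings initially)
  let xs0 : List (List Char) := string.toList.map (fun c => [c])
  -- for i in range(0, len(string)): if not string[i] in allowedChar: string[i] = charToPut
  let xs := (List.range xs0.length).foldl
      (fun acc i => if ¬ (acc.getD i [] ∈ aAllowed) then acc.set i charToPut.toList else acc) xs0
  -- string = ''.join(string)
  String.mk (PySem.Chars.join [] xs)

-- ===== PORT B =====
-- the regex character class [^A-Za-z0-9_-]: true = c is allowed (NOT matched)
def reClassAllowed (c : Char) : Bool :=
  (decide ('A' ≤ c) && decide (c ≤ 'Z')) || (decide ('a' ≤ c) && decide (c ≤ 'z')) ||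
  (decide ('0' ≤ c) && decide (c ≤ '9')) || (c == '_') || (c == '-')

-- re.sub(class, lambda m: charToPut, string): one left-to-right pass, each non-allowed char
-- (every match is a single char) replaced by charToPut inserted literally
def clearData_alt (string : String) (charToPut : String) : String :=
  String.mk (string.toList.flatMap (fun c => if reClassAllowed c then [c] else charToPut.toList))

-- ===== PRECONDITION & SPEC =====
def Spec_clearData (string : String) (charToPut : String) (out : String) : Prop := out = clearData_alt string charToPut
instance (string : String) (charToPut : String) (out : String) : Decidable (Spec_clearData string charToPut out) := by unfold Spec_clearData; infer_instance

-- ===== CLAIM (what is proved, stated in full; the proofs are below) =====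
def Claim_equal_clearData : Prop := ∀ (string : String) (charToPut : String), Dom_clearData string charToPut → Spec_clearData string charToPut (clearData string charToPut)

-- ===== LEMMAS AND PROOFS =====

theorem charEq_iff (c d : Char) : c = d ↔ c.toNat = d.toNat := by
  constructor
  · rintro rfl; rfl
  · intro h; exact Char.ext (by exact UInt32.toNat_inj.mp h)

theorem charLe_iff (c d : Char) : c ≤ d ↔ c.toNat ≤ d.toNat := by
  rw [Char.le_def, UInt32.le_iff_toNat_le]; rfl

-- A's membership test coincides with B's character class
theorem mem_aAllowed_iff (c : Char) : ([c] ∈ aAllowed) ↔ reClassAllowed c = true := by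
  have : ([c] ∈ aAllowed) ↔ c ∈ aAllowedChars := by
    simp [aAllowed]
  rw [this]
  simp only [aAllowedChars, reClassAllowed, List.mem_cons, List.not_mem_nil, or_false,
    Bool.or_eq_true, Bool.and_eq_true, decide_eq_true_iff, beq_iff_eq, charEq_iff, charLe_iff,
    Char.reduceToNat]
  omega

-- the index loop with per-cell update equals a map over the original cells
theorem foldl_set_aux {α : Type} (q : α → Prop) [DecidablePred q] (v dflt : α) :
    ∀ (l : List Nat) (xs : List α) (z : α), (∀ i ∈ l, i < xs.length) →
      l.foldl (fun acc i => if ¬ q (acc.getD i dflt) then acc.set i v else acc) (xs ++ [z])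
        = (l.foldl (fun acc i => if ¬ q (acc.getD i dflt) then acc.set i v else acc) xs) ++ [z] := by
  intro l
  induction l with
  | nil => intro xs z _; rfl
  | cons i t ih =>
    intro xs z h
    have hi : i < xs.length := h i (List.mem_cons_self ..)
    have hget : (xs ++ [z]).getD i dflt = xs.getD i dflt := by
      simp [List.getD, List.getElem?_append_left hi]
    have hset : (xs ++ [z]).set i v = xs.set i v ++ [z] := by
      rw [List.set_append]
      simp [Nat.not_le_of_lt hi]
    simp only [List.foldl_cons, hget]
    by_cases hq : q (xs.getD i dflt)
    · rw [if_neg (by simpa using hq), if_neg (by simpa using hq)]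
      exact ih xs z (fun j hj => h j (List.mem_cons_of_mem _ hj))
    · rw [if_pos hq, if_pos hq, hset]
      exact ih (xs.set i v) z (fun j hj => by
        rw [List.length_set]; exact h j (List.mem_cons_of_mem _ hj))

theorem foldl_set_eq_map {α : Type} (q : α → Prop) [DecidablePred q] (v dflt : α) :
    ∀ (xs : List α),
      (List.range xs.length).foldl (fun acc i => if ¬ q (acc.getD i dflt) then acc.set i v else acc) xs
        = xs.map (fun x => if q x then x else v) := by
  intro xs
  induction xs using List.reverseRecOn with
  | nil => rfl
  | append_singleton ys z ih =>
    rw [List.length_append, List.length_singleton, List.range_succ, List.foldl_append,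
      foldl_set_aux q v dflt _ ys z (fun i hi => List.mem_range.mp hi), ih]
    simp only [List.foldl_cons, List.foldl_nil, List.map_append, List.map_cons, List.map_nil]
    have hget : ((ys.map fun x => if q x then x else v) ++ [z]).getD ys.length dflt = z := by
      simp [List.getD]
    have hset : ((ys.map fun x => if q x then x else v) ++ [z]).set ys.length v
        = (ys.map fun x => if q x then x else v) ++ [v] := by
      rw [List.set_append]
      simp
    rw [hget]
    by_cases hq : q z <;> simp [hq, hset]

theorem join_empty_sep_eq_flatten : ∀ parts : List (List Char), PySem.Chars.join [] parts = parts.flatten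
  | [] => by simp [PySem.Chars.join_nil]
  | [a] => by simp [PySem.Chars.join_singleton]
  | a :: b :: t => by
    rw [PySem.Chars.join_cons_cons, join_empty_sep_eq_flatten (b :: t)]
    simp

theorem clearData_spec : Claim_equal_clearData := by
  intro string charToPut _
  unfold Spec_clearData clearData clearData_alt
  simp only
  rw [show (string.toList.map (fun c => [c])).length = string.toList.length by simp,
    show (List.range string.toList.length) = (List.range (string.toList.map (fun c => [c])).length) by simp]
  rw [foldl_set_eq_map (fun x => x ∈ aAllowed) charToPut.toList []]
  rw [join_empty_sep_eq_flatten, List.map_map, List.flatMap_def]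
  congr 1
  apply congrArg List.flatten
  apply List.map_congr_left
  intro c _
  simp only [Function.comp]
  by_cases h : reClassAllowed c = true
  · simp [h, (mem_aAllowed_iff c).mpr h]
  · have : ¬ ([c] ∈ aAllowed) := fun hm => h ((mem_aAllowed_iff c).mp hm)
    simp [h, this]
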